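-- pv_equiv track=rewrite | github.com/tanishqsujan/Iterative-DFS | hw.py | count_sink_nodes_dfs
-- ===== SOURCE A (Python) =====
-- def count_sink_nodes_dfs(graph):
--     """
--     Count sink nodes using iterative DFS traversal.
--     A sink node is identified as a node with no outgoing edges.
--     """
--     def is_sink_node(node):
--         """Check if a node is a sink node using DFS"""
--         stack = [node]
--         visited = set()
--
--         while stack:
--             current = stack.pop()
--
--             if current not in visited:
--                 visited.add(current)
--
--                 if graph[current]:
--                     return False
--
--                 for neighbor in graph[current]:
--                     if neighbor not in visited:
--                         stack.append(neighbor)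
--
--         return True
--
--     sink_count = 0
--     all_nodes = set(graph.keys())
--
--     for node in all_nodes:
--         if is_sink_node(node):
--             sink_count += 1
--
--     return sink_count
-- ===== SOURCE B (Python) =====
-- def count_sink_nodes_dfs(graph):
--     """Count sink nodes: nodes whose adjacency list is empty (no traversal needed)."""
--     return sum(1 for node in graph if not graph[node])
-- ===== Notes on version B (the rewrite author's own statement) =====
-- stated objective: simpler
-- what changed: Replaced the stack/visited iterative-DFS machinery (which can never visit a neighbor, since a non-empty adjacency list returns False before any push) with a single pass over the dict counting nodes whose adjacency list is empty.
import Mathlib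
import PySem

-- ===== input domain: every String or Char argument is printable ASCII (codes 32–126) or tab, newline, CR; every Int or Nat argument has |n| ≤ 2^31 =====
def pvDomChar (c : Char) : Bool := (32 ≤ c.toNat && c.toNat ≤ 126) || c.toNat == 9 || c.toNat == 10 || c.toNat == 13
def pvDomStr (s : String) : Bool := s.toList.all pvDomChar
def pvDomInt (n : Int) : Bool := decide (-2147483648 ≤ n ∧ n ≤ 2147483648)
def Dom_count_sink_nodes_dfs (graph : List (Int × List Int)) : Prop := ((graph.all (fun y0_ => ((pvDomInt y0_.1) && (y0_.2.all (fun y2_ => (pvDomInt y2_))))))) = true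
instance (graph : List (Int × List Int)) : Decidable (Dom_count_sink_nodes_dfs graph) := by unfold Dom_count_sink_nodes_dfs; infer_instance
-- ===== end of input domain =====

-- B replaces A's stack/visited DFS (whose traversal can never reach a neighbor) by one pass counting empty adjacency lists; objective: simpler.

-- ===== PORT A =====
-- termination helper for pvIsSinkLoop (cited in its decreasing_by)
theorem pvDec {a : Type} (stack l : List a) (p : a → Bool) (hs : stack ≠ []) (h : l = []) :
    (stack.dropLast ++ l.filter p).length < stack.length := by
  subst h
  cases stack with
  | nil => simp at hs
  | cons x xs => simp
-- is_sink_node's while loop; 'graph[current]' is ported with getD [] (current is always a key of graph on every reachable call)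
def pvIsSinkLoop (graph : List (Int × List Int)) (stack : List Int) (visited : PySem.Set Int) : Bool :=
  match hs : stack with
  | [] => true
  | _ :: _ =>
    let current := stack.getLast (by simp [hs])
    let rest := stack.dropLast
    if PySem.Set.contains visited current then
      pvIsSinkLoop graph rest visited
    else
      let visited' := PySem.Set.add visited current
      let adj := (PySem.Dict.mk graph).getD current []
      if h : adj = [] then
        pvIsSinkLoop graph (rest ++ adj.filter (fun n => !(PySem.Set.contains visited' n))) visited'
      else
        false
termination_by stack.length
decreasing_by
  · simp [hs]
  · exact lt_of_lt_of_eq (pvDec _ _ _ (by simp [hs]) h) (by rw [hs])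

def count_sink_nodes_dfs (graph : List (Int × List Int)) : Int :=
  (PySem.Set.ofList ((PySem.Dict.mk graph).keys)).foldl
    (fun sink_count node => if pvIsSinkLoop graph [node] PySem.Set.empty then sink_count + 1 else sink_count)
    0

-- ===== PORT B =====
-- sum(1 for node in graph if not graph[node]); dict keys are the distinct keys in first-insertion order
def count_sink_nodes_dfs_alt (graph : List (Int × List Int)) : Int :=
  (PySem.List.dedup (graph.map Prod.fst)).foldl
    (fun acc node => if (PySem.Dict.mk graph).getD node [] = [] then acc + 1 else acc)
    0

-- ===== PRECONDITION & SPEC =====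
def Spec_count_sink_nodes_dfs (graph : List (Int × List Int)) (out : Int) : Prop := out = count_sink_nodes_dfs_alt graph
instance (graph : List (Int × List Int)) (out : Int) : Decidable (Spec_count_sink_nodes_dfs graph out) := by unfold Spec_count_sink_nodes_dfs; infer_instance

-- ===== CLAIM (what is proved, stated in full; the proofs are below) =====
def Claim_equal_count_sink_nodes_dfs : Prop := ∀ (graph : List (Int × List Int)), Dom_count_sink_nodes_dfs graph → Spec_count_sink_nodes_dfs graph (count_sink_nodes_dfs graph)

-- ===== LEMMAS AND PROOFS =====

-- the DFS check from a single start node is exactly "the adjacency list is empty"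
theorem pvIsSinkLoop_single (graph : List (Int × List Int)) (node : Int) :
    pvIsSinkLoop graph [node] PySem.Set.empty
      = decide ((PySem.Dict.mk graph).getD node [] = []) := by
  rw [pvIsSinkLoop]
  by_cases h : (PySem.Dict.mk graph).getD node [] = []
  · simp [PySem.Set.empty, PySem.Set.contains, h, pvIsSinkLoop]
  · simp [PySem.Set.empty, PySem.Set.contains, h]

-- ===== VERDICT (by name: the statement is the Claim_ definition above) =====
theorem count_sink_nodes_dfs_spec : Claim_equal_count_sink_nodes_dfs := by
  intro graph _
  unfold Spec_count_sink_nodes_dfs count_sink_nodes_dfs count_sink_nodes_dfs_alt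
  have hkeys : PySem.Set.ofList ((PySem.Dict.mk graph).keys)
      = PySem.List.dedup (graph.map Prod.fst) := by
    simp [PySem.Dict.keys]
  rw [hkeys]
  congr 1
  funext acc node
  rw [pvIsSinkLoop_single]
  by_cases h : (PySem.Dict.mk graph).getD node [] = [] <;> simp [h]
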